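-- pv_equiv track=rewrite | github.com/Wacchi-Lorie/voidminer-probability-chart | dim_weight_process.py | dim_to_ore_by_vein
-- ===== SOURCE A (Python) =====
-- def dim_to_ore_by_vein(dim_veins, vein_ores):
--     data_fin = {}
--     for dim, veins in dim_veins.items():
--         data_ore = {}
--         # use vein data to construct current dim's ore weight data
--         for i in veins:
--             curr_vein = vein_ores[i]
--             for layer in curr_vein:
--                 curr_add = curr_vein[layer]
--                 if curr_add[0] in data_ore:
--                     data_ore[curr_add[0]] += curr_add[1]
--                 else:
--                     data_ore[curr_add[0]] = curr_add[1]
--         data_fin[dim] = {k: data_ore[k] for k in sorted(data_ore)}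
--     return data_fin
-- ===== SOURCE B (Python) =====
-- def dim_to_ore_by_vein(dim_veins, vein_ores):
--     def ore_totals(veins):
--         # flatten this dimension's veins into (ore, weight) pairs, then
--         # build the sorted result per distinct ore by summing its weights
--         pairs = [(ore, w) for i in veins for ore, w in vein_ores[i].values()]
--         return {k: sum(w for o, w in pairs if o == k)
--                 for k in sorted({o for o, _ in pairs})}
--     return {dim: ore_totals(veins) for dim, veins in dim_veins.items()}
-- ===== Notes on version B (the rewrite author's own statement) =====
-- stated objective: alternative
-- what changed: Replaces the incremental hash-aggregation (mutating a dict of running totals inside a triple-nested loop, then re-sorting its keys) by a flatten-then-group pass: each dimension's veins are flattened into a list of (ore, weight) pairs and the result dict is built directly by a comprehension over the sorted set of distinct ores, summing each ore's weights in one scan.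
import Mathlib
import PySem

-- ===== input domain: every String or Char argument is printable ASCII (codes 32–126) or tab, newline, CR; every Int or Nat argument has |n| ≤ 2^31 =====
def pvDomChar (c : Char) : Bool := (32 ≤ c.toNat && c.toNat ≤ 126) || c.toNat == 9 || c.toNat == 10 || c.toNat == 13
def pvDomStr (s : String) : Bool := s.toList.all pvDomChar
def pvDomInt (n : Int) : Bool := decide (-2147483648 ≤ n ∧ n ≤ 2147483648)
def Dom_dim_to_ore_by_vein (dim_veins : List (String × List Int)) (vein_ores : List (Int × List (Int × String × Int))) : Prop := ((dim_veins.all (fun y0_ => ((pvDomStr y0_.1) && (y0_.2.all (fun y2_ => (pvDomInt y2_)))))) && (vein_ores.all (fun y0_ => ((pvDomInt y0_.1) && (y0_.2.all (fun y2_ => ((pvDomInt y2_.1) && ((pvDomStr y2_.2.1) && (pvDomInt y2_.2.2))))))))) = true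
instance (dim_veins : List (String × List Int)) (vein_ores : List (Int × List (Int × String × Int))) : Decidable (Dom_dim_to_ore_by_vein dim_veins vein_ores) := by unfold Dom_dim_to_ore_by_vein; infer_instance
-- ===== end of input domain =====

-- B replaces A's incremental hash-aggregation (a running-total dict mutated in a triple-nested
-- loop, then re-sorted) by a flatten-then-group pass: it flattens each dimension's veins into a
-- list of (ore, weight) pairs and builds the sorted result directly by a comprehension over the
-- distinct ores, summing each ore's weights in one scan (objective: alternative decomposition).

-- ===== PORT A =====
def dim_to_ore_by_vein (dim_veins : List (String × List Int)) (vein_ores : List (Int × List (Int × String × Int))) : List (String × List (String × Int)) :=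
  -- data_fin = {}; for dim, veins in dim_veins.items(): …
  (dim_veins.foldl (fun data_fin dv =>
      -- data_ore = {}; for i in veins: curr_vein = vein_ores[i]; for layer in curr_vein: …
      let data_ore : PySem.Dict String Int :=
        dv.2.foldl (fun d i =>
          let curr_vein := (PySem.Dict.mk vein_ores).getD i []
          (curr_vein.map Prod.fst).foldl (fun d layer =>
            let curr_add := (PySem.Dict.mk curr_vein).getD layer ("", 0)
            if d.contains curr_add.1 then
              d.insert curr_add.1 (d.getD curr_add.1 0 + curr_add.2)
            else
              d.insert curr_add.1 curr_add.2) d) PySem.Dict.empty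
      -- data_fin[dim] = {k: data_ore[k] for k in sorted(data_ore)}
      data_fin.insert dv.1
        ((PySem.List.sorted data_ore.keys (fun k => k) false).foldl
            (fun acc k => acc.insert k (data_ore.getD k 0)) PySem.Dict.empty).items)
    PySem.Dict.empty).items

-- ===== PORT B =====
def dim_to_ore_by_vein_alt (dim_veins : List (String × List Int)) (vein_ores : List (Int × List (Int × String × Int))) : List (String × List (String × Int)) :=
  -- {dim: ore_totals(veins) for dim, veins in dim_veins.items()}
  (PySem.Dict.ofList (dim_veins.map (fun dv =>
     (dv.1,
      -- pairs = [(ore, w) for i in veins for ore, w in vein_ores[i].values()]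
      let pairs : List (String × Int) :=
        dv.2.flatMap (fun i => ((PySem.Dict.mk vein_ores).getD i []).map (fun t => (t.2.1, t.2.2)))
      -- {k: sum(w for o, w in pairs if o == k) for k in sorted({o for o, _ in pairs})}
      (PySem.List.sorted (PySem.Set.ofList (pairs.map Prod.fst)) (fun k => k) false).map
        (fun k => (k, ((pairs.filter (fun p => p.1 == k)).map Prod.snd).sum)))))).items

-- ===== PRECONDITION & SPEC =====
-- Pre_ excludes (a) inputs where some vein index is not a key of vein_ores — there Python A raises
-- KeyError — and (b) association lists with duplicate dict keys (in dim_veins, vein_ores, or an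
-- inner layer dict), on which the list↔dict reading of the input is ambiguous and A's collapsing
-- of the duplicates is accidental.
def Pre_dim_to_ore_by_vein (dim_veins : List (String × List Int)) (vein_ores : List (Int × List (Int × String × Int))) : Prop :=
  (dim_veins.map Prod.fst).Nodup ∧ (vein_ores.map Prod.fst).Nodup ∧
  (∀ p ∈ vein_ores, (p.2.map Prod.fst).Nodup) ∧
  (∀ q ∈ dim_veins, ∀ i ∈ q.2, i ∈ vein_ores.map Prod.fst)
instance (dim_veins : List (String × List Int)) (vein_ores : List (Int × List (Int × String × Int))) : Decidable (Pre_dim_to_ore_by_vein dim_veins vein_ores) := by unfold Pre_dim_to_ore_by_vein; infer_instance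
def pvWitness_dim_to_ore_by_vein : (List (String × List Int)) × (List (Int × List (Int × String × Int))) :=
  ([("a", [0, 1])], [(0, [(0, ("x", 2)), (1, ("y", 3))]), (1, [(0, ("x", 4))])])
def Spec_dim_to_ore_by_vein (dim_veins : List (String × List Int)) (vein_ores : List (Int × List (Int × String × Int))) (out : List (String × List (String × Int))) : Prop := out = dim_to_ore_by_vein_alt dim_veins vein_ores
instance (dim_veins : List (String × List Int)) (vein_ores : List (Int × List (Int × String × Int))) (out : List (String × List (String × Int))) : Decidable (Spec_dim_to_ore_by_vein dim_veins vein_ores out) := by unfold Spec_dim_to_ore_by_vein; infer_instance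

-- ===== CLAIM (what is proved, stated in full; the proofs are below) =====
def Claim_equal_dim_to_ore_by_vein : Prop := ∀ (dim_veins : List (String × List Int)) (vein_ores : List (Int × List (Int × String × Int))), Dom_dim_to_ore_by_vein dim_veins vein_ores → Pre_dim_to_ore_by_vein dim_veins vein_ores → Spec_dim_to_ore_by_vein dim_veins vein_ores (dim_to_ore_by_vein dim_veins vein_ores)

-- ===== LEMMAS AND PROOFS =====

-- A's if-in-else accumulation, folded over a pair list, read off at one key:
-- running total at k = initial total at k + sum of the weights filed under k.
theorem pv_getD_foldl_add (l : List (String × Int)) (d : PySem.Dict String Int) (k : String) :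
    (l.foldl (fun d p => if d.contains p.1 then d.insert p.1 (d.getD p.1 0 + p.2)
                         else d.insert p.1 p.2) d).getD k 0
      = d.getD k 0 + ((l.filter (fun p => p.1 == k)).map Prod.snd).sum := by
  induction l generalizing d with
  | nil => simp
  | cons p t ih =>
    simp only [List.foldl_cons, ih, List.filter_cons]
    by_cases hk : p.1 = k
    · subst hk
      by_cases hc : (d.contains p.1 : Bool)
      · simp [hc]; ring
      · simp only [Bool.not_eq_true] at hc
        simp [hc, PySem.Dict.getD_of_not_contains d 0 hc]
    · have hb : (p.1 == k) = false := by simp [hk]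
      by_cases hc : (d.contains p.1 : Bool) <;>
        simp [hc, hb, PySem.Dict.getD_insert, Ne.symm hk]

theorem pv_items_empty {κ ν : Type} : (PySem.Dict.empty : PySem.Dict κ ν).items = [] := rfl

-- items of a dict built from an assoc list with distinct keys is that list
theorem pv_items_ofList {ν : Type} (l : List (String × ν)) (h : (l.map Prod.fst).Nodup) :
    (PySem.Dict.ofList l).items = l := by
  show (l.foldl (fun d p => d.insert p.1 p.2) PySem.Dict.empty).items = l
  rw [PySem.Dict.items_foldl_insert_fresh l Prod.fst Prod.snd _
        (fun a _ => PySem.Dict.contains_empty _) h]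
  simp [PySem.Dict.empty]

-- any value stored in (Dict.mk vein_ores) is an inner dict of vein_ores, so its keys are Nodup
theorem pv_inner_nodup (vein_ores : List (Int × List (Int × String × Int)))
    (hin : ∀ p ∈ vein_ores, (p.2.map Prod.fst).Nodup) (i : Int) :
    (((PySem.Dict.mk vein_ores).getD i []).map Prod.fst).Nodup := by
  rw [PySem.Dict.getD_eq_get?_getD]
  cases h : (PySem.Dict.mk vein_ores).get? i with
  | none => simp
  | some v =>
    have hv : (i, v) ∈ (PySem.Dict.mk vein_ores).items := PySem.Dict.mem_items_of_get?_eq_some _ h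
    simpa using hin (i, v) hv

-- A's triple loop over one dimension's veins equals the if-in-else fold over B's flattened pairs
theorem pv_data_ore_eq (vein_ores : List (Int × List (Int × String × Int)))
    (hin : ∀ p ∈ vein_ores, (p.2.map Prod.fst).Nodup) (veins : List Int) :
    veins.foldl (fun d i =>
        (((PySem.Dict.mk vein_ores).getD i []).map Prod.fst).foldl (fun d layer =>
          if d.contains ((PySem.Dict.mk ((PySem.Dict.mk vein_ores).getD i [])).getD layer ("", 0)).1 then
            d.insert ((PySem.Dict.mk ((PySem.Dict.mk vein_ores).getD i [])).getD layer ("", 0)).1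
              (d.getD ((PySem.Dict.mk ((PySem.Dict.mk vein_ores).getD i [])).getD layer ("", 0)).1 0 +
               ((PySem.Dict.mk ((PySem.Dict.mk vein_ores).getD i [])).getD layer ("", 0)).2)
          else d.insert ((PySem.Dict.mk ((PySem.Dict.mk vein_ores).getD i [])).getD layer ("", 0)).1
              ((PySem.Dict.mk ((PySem.Dict.mk vein_ores).getD i [])).getD layer ("", 0)).2) d) PySem.Dict.empty
      = (veins.flatMap (fun i => ((PySem.Dict.mk vein_ores).getD i []).map (fun t => (t.2.1, t.2.2)))).foldl
          (fun d p => if d.contains p.1 then d.insert p.1 (d.getD p.1 0 + p.2)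
                      else d.insert p.1 p.2) PySem.Dict.empty := by
  rw [List.foldl_flatMap]
  refine PySem.List.foldl_congr_mem' veins _ _ _ (fun i _ d => ?_)
  rw [List.foldl_map, List.foldl_map]
  refine PySem.List.foldl_congr_mem' _ _ _ _ (fun t ht d' => ?_)
  have := PySem.Dict.getD_of_mem_items (PySem.Dict.mk (((PySem.Dict.mk vein_ores).getD i [])))
      (k := t.1) (v := t.2) (by simpa using ht) (pv_inner_nodup vein_ores hin i) ("", 0)
  simp only [this]

-- ===== VERDICT (by name: the statement is the Claim_ definition above) =====
theorem dim_to_ore_by_vein_spec : Claim_equal_dim_to_ore_by_vein := by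
  intro dim_veins vein_ores _ hpre
  obtain ⟨hdims, _, hin, _⟩ := hpre
  unfold Spec_dim_to_ore_by_vein dim_to_ore_by_vein dim_to_ore_by_vein_alt
  rw [pv_items_ofList _ (by simpa using hdims),
      PySem.Dict.items_foldl_insert_fresh dim_veins Prod.fst _ PySem.Dict.empty
        (fun a _ => PySem.Dict.contains_empty _) hdims]
  simp only [pv_items_empty, List.nil_append]
  refine List.map_congr_left (fun dv _ => ?_)
  simp only [Prod.mk.injEq, true_and]
  rw [pv_data_ore_eq vein_ores hin dv.2]
  set pairs := dv.2.flatMap (fun i => ((PySem.Dict.mk vein_ores).getD i []).map (fun t => (t.2.1, t.2.2))) with hpairs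
  set d := pairs.foldl (fun d p => if d.contains p.1 then d.insert p.1 (d.getD p.1 0 + p.2)
                       else d.insert p.1 p.2) PySem.Dict.empty with hd
  have hkeys : d.keys = PySem.Set.ofList (pairs.map Prod.fst) := by
    have hfun : pairs.foldl (fun d p => if d.contains p.1 then d.insert p.1 (d.getD p.1 0 + p.2)
                       else d.insert p.1 p.2) PySem.Dict.empty
        = pairs.foldl (fun d p => d.insert p.1
            (if d.contains p.1 then d.getD p.1 0 + p.2 else p.2)) PySem.Dict.empty :=
      PySem.List.foldl_congr_mem' _ _ _ _ (fun p _ d => by by_cases h : (d.contains p.1 : Bool) <;> simp [h])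
    rw [hd, hfun, PySem.Dict.keys_foldl_insert_key, PySem.Dict.keys_empty, PySem.Set.update_nil_left]
  have hnodup : (PySem.List.sorted d.keys (fun k => k) false).Nodup :=
    (PySem.List.sorted_perm d.keys (fun k => k) false).symm.nodup (by rw [hkeys]; exact PySem.Set.nodup_ofList _)
  rw [PySem.Dict.items_foldl_insert_fresh _ (fun k => k) (fun k => d.getD k 0) PySem.Dict.empty
        (fun a _ => PySem.Dict.contains_empty _) (by simpa using hnodup)]
  simp only [pv_items_empty, List.nil_append, hkeys]
  exact List.map_congr_left (fun k _ => by
    rw [hd, pv_getD_foldl_add]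
    simp [PySem.Dict.getD_empty])
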